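-- pv_equiv track=rewrite | github.com/waixiong/PatternImageGenerator | patternDecode.py | checkEOF
-- ===== SOURCE A (Python) =====
-- def checkEOF(bytesData):
--     counter = 0
--     index = 0
--     for byte in bytesData:
--         if byte == 0x1a:
--             counter += 1
--         else:
--             counter = 0
--         index += 1
--         if counter >= 3:
--             break
--     return bytesData[:index-counter]
-- ===== SOURCE B (Python) =====
-- def checkEOF(bytesData):
--     for i in range(len(bytesData) - 2):
--         if bytesData[i] == 0x1a and bytesData[i + 1] == 0x1a and bytesData[i + 2] == 0x1a:
--             return bytesData[:i]
--     # no full EOF marker: drop any trailing partial marker (at most two 0x1a bytes)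
--     end = len(bytesData)
--     while end > 0 and bytesData[end - 1] == 0x1a:
--         end -= 1
--     return bytesData[:end]
-- ===== Notes on version B (the rewrite author's own statement) =====
-- stated objective: idiomatic
-- what changed: Replaces the per-byte consecutive-counter loop with a direct search for the first occurrence of three consecutive 0x1a bytes (returning the prefix before it) and, when none exists, trimming the trailing partial marker of 0x1a bytes with an end index.
import Mathlib
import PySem

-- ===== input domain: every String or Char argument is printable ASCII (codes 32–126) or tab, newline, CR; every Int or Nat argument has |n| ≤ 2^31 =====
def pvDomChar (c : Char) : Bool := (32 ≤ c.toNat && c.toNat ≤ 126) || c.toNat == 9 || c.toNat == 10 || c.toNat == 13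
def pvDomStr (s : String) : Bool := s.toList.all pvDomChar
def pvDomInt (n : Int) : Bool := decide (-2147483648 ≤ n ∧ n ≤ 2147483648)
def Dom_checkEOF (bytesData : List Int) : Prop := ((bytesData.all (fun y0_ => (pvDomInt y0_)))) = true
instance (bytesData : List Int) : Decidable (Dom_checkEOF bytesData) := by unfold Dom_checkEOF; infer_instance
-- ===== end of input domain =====

-- B searches directly for the first run of three 0x1a bytes and returns the prefix before
-- it; if none exists it trims the trailing partial marker of 0x1a bytes with an end index.

-- ===== PORT A =====
-- the for-loop with `break`: state = (counter, index)
def checkEOFLoop : List Int → Int → Int → Int × Int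
  | [], counter, index => (counter, index)
  | byte :: rest, counter, index =>
    let counter' := if byte = 26 then counter + 1 else (0 : Int)
    let index' := index + 1
    if 3 ≤ counter' then (counter', index') else checkEOFLoop rest counter' index'

def checkEOF (bytesData : List Int) : List Int :=
  let p := checkEOFLoop bytesData 0 0
  PySem.List.slice bytesData none (some (p.2 - p.1))

-- ===== PORT B =====
-- the `for i in range(len(bytesData) - 2)` search, examining bytesData[i], [i+1], [i+2]
def findTriple : List Int → Nat → Option Nat
  | a :: b :: c :: rest, i =>
    if a = 26 ∧ b = 26 ∧ c = 26 then some i else findTriple (b :: c :: rest) (i + 1)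
  | _, _ => none

-- the `while end > 0 and bytesData[end-1] == 0x1a: end -= 1` loop
def trimEnd (data : List Int) : Nat → Nat
  | 0 => 0
  | e + 1 => if data.getD e 0 = 26 then trimEnd data e else e + 1

def checkEOF_alt (bytesData : List Int) : List Int :=
  match findTriple bytesData 0 with
  | some i => bytesData.take i
  | none => bytesData.take (trimEnd bytesData bytesData.length)

-- ===== PRECONDITION & SPEC =====
def Spec_checkEOF (bytesData : List Int) (out : List Int) : Prop := out = checkEOF_alt bytesData
instance (bytesData : List Int) (out : List Int) : Decidable (Spec_checkEOF bytesData out) := by unfold Spec_checkEOF; infer_instance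

-- ===== CLAIM (what is proved, stated in full; the proofs are below) =====
def Claim_equal_checkEOF : Prop := ∀ (bytesData : List Int), Dom_checkEOF bytesData → Spec_checkEOF bytesData (checkEOF bytesData)

-- ===== LEMMAS AND PROOFS =====

-- cut length: number of initial bytes both programs keep, given c pending consecutive 0x1a
def hN : List Int → Nat → Nat
  | [], _ => 0
  | b :: r, c => if b = 26 then (if 2 ≤ c then 0 else hN r (c + 1)) else c + 1 + hN r 0

-- proof-only characterisation of the trailing trim
def stripTrailing (data : List Int) : List Int :=
  (data.reverse.dropWhile (· == 26)).reverse

theorem loopA_spec : ∀ (rest : List Int) (cn : Nat) (i : Int), cn ≤ 2 →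
    (checkEOFLoop rest (cn : Int) i).2 - (checkEOFLoop rest (cn : Int) i).1
      = i - cn + (hN rest cn : Int) := by
  intro rest
  induction rest with
  | nil => intro cn i h; simp [checkEOFLoop, hN]
  | cons b r ih =>
    intro cn i h
    by_cases hb : b = 26
    · by_cases hc : 2 ≤ cn
      · have hcn : cn = 2 := by omega
        subst hcn
        simp [checkEOFLoop, hN, hb]
        omega
      · simp only [checkEOFLoop, hN, hb, if_pos]
        rw [if_neg (by omega : ¬ (3:Int) ≤ (cn:Int) + 1), if_neg hc]
        have := ih (cn + 1) (i + 1) (by omega)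
        rw [show ((cn:Int) + 1) = ((cn + 1 : Nat) : Int) by omega, this]
        omega
    · simp only [checkEOFLoop, hN, hb, if_false]
      rw [if_neg (by norm_num : ¬ (3:Int) ≤ 0)]
      have := ih 0 (i + 1) (by omega)
      push_cast at this
      rw [this]
      push_cast; ring

theorem checkEOF_eq_take (l : List Int) : checkEOF l = l.take (hN l 0) := by
  show PySem.List.slice l none (some ((checkEOFLoop l 0 0).2 - (checkEOFLoop l 0 0).1)) = l.take (hN l 0)
  have h := loopA_spec l 0 0 (by omega)
  simp only [Nat.cast_zero] at h
  rw [h, show (0:Int) - 0 + (hN l 0 : Int) = ((hN l 0 : Nat) : Int) by ring]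
  exact PySem.List.slice_to_natCast l (hN l 0)

theorem hN_cons_zero (x : Int) (rest : List Int)
    (h : ¬ (x = 26 ∧ (rest.take 2).all (· == 26))) :
    hN (x :: rest) 0 = hN rest 0 + 1 := by
  by_cases hx : x = 26
  · subst hx
    match rest with
    | [] => exact absurd ⟨rfl, by simp⟩ h
    | [y] =>
      by_cases hy : y = 26
      · exact absurd ⟨rfl, by simp [hy]⟩ h
      · simp [hN, hy]
    | y :: z :: r =>
      by_cases hy : y = 26
      · by_cases hz : z = 26
        · exact absurd ⟨rfl, by simp [hy, hz]⟩ h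
        · simp [hN, hy, hz]; omega
      · simp [hN, hy]; split <;> omega
  · simp [hN, hx]; omega

theorem hN_cons_eof (x : Int) (rest : List Int)
    (h : x = 26 ∧ (rest.take 2).all (· == 26)) :
    hN (x :: rest) 0 = 0 := by
  obtain ⟨hx, hall⟩ := h
  subst hx
  match rest with
  | [] => simp [hN]
  | [y] =>
    simp at hall
    simp [hN, hall]
  | y :: z :: r =>
    simp at hall
    simp [hN, hall.1, hall.2]

theorem findTriple_cons (x : Int) (rest : List Int) (i : Nat)
    (h : ¬ (x = 26 ∧ (rest.take 2).all (· == 26))) :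
    findTriple (x :: rest) i = findTriple rest (i + 1) := by
  match rest with
  | [] => simp [findTriple]
  | [y] => simp [findTriple]
  | y :: z :: r =>
    have : ¬ (x = 26 ∧ y = 26 ∧ z = 26) := by
      intro ⟨h1, h2, h3⟩; exact h ⟨h1, by simp [h2, h3]⟩
    simp [findTriple, this]

theorem findTriple_shift : ∀ (l : List Int) (i : Nat),
    findTriple l i = (findTriple l 0).map (i + ·) := by
  intro l
  induction l with
  | nil => intro i; simp [findTriple]
  | cons a t ih =>
    intro i
    match t with
    | [] => simp [findTriple]
    | [y] => simp [findTriple]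
    | b :: c :: r =>
      by_cases htr : a = 26 ∧ b = 26 ∧ c = 26
      · simp [findTriple, htr]
      · simp only [findTriple, if_neg htr]
        rw [ih (i + 1), ih 1]
        cases findTriple (b :: c :: r) 0
        · simp
        · simp; omega

theorem findTriple_some_hN : ∀ (l : List Int) (p : Nat),
    findTriple l 0 = some p → hN l 0 = p := by
  intro l
  induction l with
  | nil => intro p hp; simp [findTriple] at hp
  | cons x rest ih =>
    intro p hp
    by_cases h : x = 26 ∧ (rest.take 2).all (· == 26)
    · rw [hN_cons_eof x rest h]
      match rest, h with
      | [], ⟨_, _⟩ => simp [findTriple] at hp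
      | [y], ⟨_, _⟩ => simp [findTriple] at hp
      | y :: z :: r, ⟨hx, hall⟩ =>
        simp at hall
        simp [findTriple, hx, hall.1, hall.2] at hp
        omega
    · rw [findTriple_cons x rest 0 h, findTriple_shift] at hp
      cases hq : findTriple rest 0 with
      | none => simp [hq] at hp
      | some q =>
        simp [hq] at hp
        rw [hN_cons_zero x rest h, ih q hq]
        omega

theorem strip_cons (x : Int) (rest : List Int)
    (h : ¬ (x = 26 ∧ rest.all (· == 26))) :
    stripTrailing (x :: rest) = x :: stripTrailing rest := by
  unfold stripTrailing
  rw [List.reverse_cons, List.dropWhile_append]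
  by_cases he : rest.reverse.dropWhile (· == 26) = []
  · have hall : rest.all (· == 26) := by
      have := List.dropWhile_eq_nil_iff.mp he
      simp only [List.all_eq_true]
      intro a ha
      simpa using this a (by simp [ha])
    have hx : x ≠ 26 := fun hx => h ⟨hx, hall⟩
    have hxb : (x == 26) = false := by simpa using hx
    simp [he, List.dropWhile, hxb]
  · simp [he]

theorem strip_snoc_eof (t : List Int) : stripTrailing (t ++ [26]) = stripTrailing t := by
  simp [stripTrailing, List.dropWhile]

theorem strip_snoc_keep (t : List Int) (x : Int) (hx : x ≠ 26) :
    stripTrailing (t ++ [x]) = t ++ [x] := by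
  have hxb : (x == 26) = false := by simpa using hx
  simp [stripTrailing, List.dropWhile, hxb]

theorem trimEnd_spec : ∀ (l : List Int) (e : Nat), e ≤ l.length →
    l.take (trimEnd l e) = stripTrailing (l.take e) := by
  intro l e
  induction e with
  | zero => intro _; simp [trimEnd, stripTrailing]
  | succ e ih =>
    intro he
    have helt : e < l.length := by omega
    have htake : l.take (e + 1) = l.take e ++ [l[e]] := by
      rw [List.take_succ, List.getElem?_eq_getElem helt]; rfl
    have hgd : l.getD e 0 = l[e] := List.getD_eq_getElem l 0 helt
    by_cases hx : l[e] = 26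
    · rw [show trimEnd l (e + 1) = trimEnd l e by rw [trimEnd, hgd, if_pos hx]]
      rw [ih (by omega), htake, hx, strip_snoc_eof]
    · rw [show trimEnd l (e + 1) = e + 1 by rw [trimEnd, hgd, if_neg hx]]
      rw [htake, strip_snoc_keep _ _ hx, ← htake]

theorem findTriple_none_strip : ∀ (l : List Int),
    findTriple l 0 = none → l.take (hN l 0) = stripTrailing l := by
  intro l
  induction l with
  | nil => simp [stripTrailing]
  | cons x rest ih =>
    intro hn
    by_cases h : x = 26 ∧ (rest.take 2).all (· == 26)
    · match rest, h with
      | [], ⟨hx, _⟩ => subst hx; simp [hN, stripTrailing]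
      | [y], ⟨hx, hall⟩ =>
        simp at hall
        subst hx; subst hall
        simp [hN, stripTrailing]
      | y :: z :: r, ⟨hx, hall⟩ =>
        simp at hall
        simp [findTriple, hx, hall.1, hall.2] at hn
    · rw [findTriple_cons x rest 0 h, findTriple_shift] at hn
      cases hq : findTriple rest 0 with
      | some q => simp [hq] at hn
      | none =>
        rw [hN_cons_zero x rest h, List.take_succ_cons, ih hq]
        rw [strip_cons]
        intro ⟨hx, hall⟩
        apply h
        refine ⟨hx, ?_⟩
        simp only [List.all_eq_true] at hall ⊢
        intro a ha
        exact hall a (List.mem_of_mem_take ha)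

theorem checkEOF_alt_eq_take (l : List Int) : checkEOF_alt l = l.take (hN l 0) := by
  unfold checkEOF_alt
  cases hq : findTriple l 0 with
  | some p => rw [findTriple_some_hN l p hq]
  | none =>
    rw [trimEnd_spec l l.length (le_refl _), List.take_length,
      findTriple_none_strip l hq]

-- ===== VERDICT (by name: the statement is the Claim_ definition above) =====
theorem checkEOF_spec : Claim_equal_checkEOF := by
  intro l _
  unfold Spec_checkEOF
  rw [checkEOF_eq_take, checkEOF_alt_eq_take]
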